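-- pv_equiv track=rewrite | github.com/MrBrantCode/unitest_baseline | mut_generate/mist_train_cf/cf_93930/solution.py | get_first_letters
-- ===== SOURCE A (Python) =====
-- def get_first_letters(input_string):
--     vowels = ['a', 'e', 'i', 'o', 'u']
--     result = ""
--
--     words = input_string.split()
--
--     for word in words:
--         if len(word) == 0 or word[0].lower() in vowels:
--             continue
--
--         result += word[0].upper()
--
--     return result
-- ===== SOURCE B (Python) =====
-- def get_first_letters(input_string):
--     result = []
--     prev_space = True
--     for ch in input_string:
--         if prev_space and not ch.isspace() and ch.lower() not in "aeiou":
--             result.append(ch.upper())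
--         prev_space = ch.isspace()
--     return "".join(result)
-- ===== Notes on version B (the rewrite author's own statement) =====
-- stated objective: alternative
-- what changed: Replaces split()-then-iterate-words with a single character scan that detects word starts via a previous-char-was-whitespace flag and collects letters into a joined list.
import Mathlib
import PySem

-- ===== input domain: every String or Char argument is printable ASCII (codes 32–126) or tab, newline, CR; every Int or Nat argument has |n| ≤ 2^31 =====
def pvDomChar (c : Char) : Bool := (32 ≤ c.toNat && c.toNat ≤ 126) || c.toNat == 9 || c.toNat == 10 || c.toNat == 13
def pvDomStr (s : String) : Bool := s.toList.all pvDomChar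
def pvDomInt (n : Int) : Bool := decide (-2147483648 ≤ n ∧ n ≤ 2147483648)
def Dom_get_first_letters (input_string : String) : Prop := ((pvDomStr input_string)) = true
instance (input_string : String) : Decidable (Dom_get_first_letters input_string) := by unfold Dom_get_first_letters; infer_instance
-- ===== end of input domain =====

-- B replaces split()-then-iterate-words with a single previous-char-was-whitespace boundary scan (alternative decomposition, same O(n) cost).

-- ===== PORT A =====
def get_first_letters (input_string : String) : String :=
  let vowels : List Char := ['a', 'e', 'i', 'o', 'u']
  let words := PySem.Chars.split₀ input_string.toList
  String.ofList (words.foldl (fun result word =>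
    match word with
    | [] => result  -- len(word) == 0: continue
    | c :: _ =>
        if PySem.Chars.lowerChar c ∈ vowels then result
        else result ++ [PySem.Chars.upperChar c]) [])

-- ===== PORT B =====
def get_first_letters_alt (input_string : String) : String :=
  String.ofList ((input_string.toList.foldl (fun (st : List Char × Bool) ch =>
    (if st.2 = true ∧ PySem.Chars.isspace ch = false ∧
        PySem.Chars.lowerChar ch ∉ "aeiou".toList
     then st.1 ++ [PySem.Chars.upperChar ch] else st.1,
     PySem.Chars.isspace ch)) ([], true)).1)

-- ===== PRECONDITION & SPEC =====
def Spec_get_first_letters (input_string : String) (out : String) : Prop := out = get_first_letters_alt input_string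
instance (input_string : String) (out : String) : Decidable (Spec_get_first_letters input_string out) := by unfold Spec_get_first_letters; infer_instance

-- ===== CLAIM (what is proved, stated in full; the proofs are below) =====
def Claim_equal_get_first_letters : Prop := ∀ (input_string : String), Dom_get_first_letters input_string → Spec_get_first_letters input_string (get_first_letters input_string)

-- ===== LEMMAS AND PROOFS =====

-- the contribution of one word-starting character
def pvContrib (c : Char) : List Char :=
  if PySem.Chars.lowerChar c ∈ ['a', 'e', 'i', 'o', 'u'] then []
  else [PySem.Chars.upperChar c]

-- the contribution of one word (A's loop body)
def pvFC : List Char → List Char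
  | [] => []
  | c :: _ => pvContrib c

-- B's scan result from a given previous-was-space flag
def pvScan : List Char → Bool → List Char
  | [], _ => []
  | c :: rest, prev =>
      (if prev && !PySem.Chars.isspace c then pvContrib c else []) ++
        pvScan rest (PySem.Chars.isspace c)

theorem pv_go_acc (cs : List Char) : ∀ cur acc,
    PySem.Chars.split₀.go cs cur acc = acc.reverse ++ PySem.Chars.split₀.go cs cur [] := by
  induction cs with
  | nil => intro cur acc; simp [PySem.Chars.split₀.go]; split_ifs <;> simp
  | cons c rest ih =>
      intro cur acc
      simp only [PySem.Chars.split₀.go]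
      split_ifs with h1 h2
      · exact ih [] acc
      · rw [ih [] (cur.reverse :: acc), ih [] [cur.reverse]]; simp
      · exact ih (c :: cur) acc

theorem pv_foldlA (ws : List (List Char)) : ∀ res,
    ws.foldl (fun result word =>
      match word with
      | [] => result
      | c :: _ =>
          if PySem.Chars.lowerChar c ∈ ['a', 'e', 'i', 'o', 'u'] then result
          else result ++ [PySem.Chars.upperChar c]) res
      = res ++ ws.flatMap pvFC := by
  induction ws with
  | nil => intro res; simp
  | cons w rest ih =>
      intro res
      rw [List.foldl_cons, ih, List.flatMap_cons]
      cases w with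
      | nil => simp [pvFC]
      | cons c t =>
          simp only [pvFC, pvContrib]
          split_ifs <;> simp

theorem pv_foldlB (cs : List Char) : ∀ res prev,
    (cs.foldl (fun (st : List Char × Bool) ch =>
      (if st.2 = true ∧ PySem.Chars.isspace ch = false ∧
          PySem.Chars.lowerChar ch ∉ "aeiou".toList
       then st.1 ++ [PySem.Chars.upperChar ch] else st.1,
       PySem.Chars.isspace ch)) (res, prev)).1
      = res ++ pvScan cs prev := by
  induction cs with
  | nil => intro res prev; simp [pvScan]
  | cons c rest ih =>
      intro res prev
      simp only [List.foldl, ih, pvScan]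
      by_cases hp : prev = true
      · by_cases hs : PySem.Chars.isspace c = true
        · simp [hp, hs]
        · simp only [Bool.not_eq_true] at hs
          by_cases hv : PySem.Chars.lowerChar c ∈ "aeiou".toList
          · have hv' : PySem.Chars.lowerChar c ∈ ['a', 'e', 'i', 'o', 'u'] := by
              simpa using hv
            simp [hp, hs, pvContrib, hv']
          · have hv' : PySem.Chars.lowerChar c ∉ ['a', 'e', 'i', 'o', 'u'] := by
              simpa using hv
            simp [hp, hs, pvContrib, hv']
      · simp only [Bool.not_eq_true] at hp
        simp [hp]

theorem pv_main (cs : List Char) :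
    (PySem.Chars.split₀.go cs [] []).flatMap pvFC = pvScan cs true ∧
    ∀ c cur, (PySem.Chars.split₀.go cs (cur ++ [c]) []).flatMap pvFC
        = pvContrib c ++ pvScan cs false := by
  induction cs with
  | nil =>
      constructor
      · simp [PySem.Chars.split₀.go, pvScan]
      · intro c cur
        simp [PySem.Chars.split₀.go, pvScan, pvFC]
  | cons d rest ih =>
      constructor
      · simp only [PySem.Chars.split₀.go]
        by_cases hs : PySem.Chars.isspace d = true
        · simp only [hs, if_true, List.isEmpty_nil, pvScan]
          simp [ih.1]
        · simp only [Bool.not_eq_true] at hs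
          simp only [hs, Bool.false_eq_true, if_false, pvScan]
          have := ih.2 d []
          simpa [hs] using this
      · intro c cur
        simp only [PySem.Chars.split₀.go]
        by_cases hs : PySem.Chars.isspace d = true
        · have hne : ((cur ++ [c]).isEmpty) = false := by simp
          simp only [hs, if_true, hne, Bool.false_eq_true, if_false]
          rw [pv_go_acc]
          simp only [List.flatMap_append, List.reverse_cons, List.reverse_nil,
            List.nil_append, List.flatMap_cons, List.flatMap_nil,
            List.reverse_append, List.reverse_cons]
          simp [pvFC, ih.1, pvScan, hs]
        · simp only [Bool.not_eq_true] at hs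
          simp only [hs, Bool.false_eq_true, if_false]
          have := ih.2 c (d :: cur)
          simp only [List.cons_append] at this ⊢
          simp [this, pvScan, hs]

-- ===== VERDICT (by name: the statement is the Claim_ definition above) =====
theorem get_first_letters_spec : Claim_equal_get_first_letters := by
  intro s _
  unfold Spec_get_first_letters get_first_letters get_first_letters_alt
  simp only [PySem.Chars.split₀, pv_foldlA, pv_foldlB, List.nil_append]
  rw [(pv_main s.toList).1]
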